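-- pv_equiv track=rewrite | github.com/swati-bakshani/python | python_problem_solving/test/find_uniqe_words.py | find_unique_words
-- ===== SOURCE A (Python) =====
-- def find_unique_words(input_str):
--     dict = {}
--     output_list = []
--     for word in input_str.split():
--         if word in dict:
--             dict[word] = dict[word]+1
--         else:
--             dict[word] = 1
--
--     for k,v in dict.items():
--         if v == 1:
--             output_list.append(k)
--     return output_list
-- ===== SOURCE B (Python) =====
-- def find_unique_words(input_str):
--     words = input_str.split()
--     return [w for w in words if words.count(w) == 1]
-- ===== Notes on version B (the rewrite author's own statement) =====
-- stated objective: simpler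
-- what changed: Replaces the two-pass frequency-dict build plus items scan with a single filter over the split word list that re-scans it with count(w)==1; output order matches because unique words occur exactly once.
import Mathlib
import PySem

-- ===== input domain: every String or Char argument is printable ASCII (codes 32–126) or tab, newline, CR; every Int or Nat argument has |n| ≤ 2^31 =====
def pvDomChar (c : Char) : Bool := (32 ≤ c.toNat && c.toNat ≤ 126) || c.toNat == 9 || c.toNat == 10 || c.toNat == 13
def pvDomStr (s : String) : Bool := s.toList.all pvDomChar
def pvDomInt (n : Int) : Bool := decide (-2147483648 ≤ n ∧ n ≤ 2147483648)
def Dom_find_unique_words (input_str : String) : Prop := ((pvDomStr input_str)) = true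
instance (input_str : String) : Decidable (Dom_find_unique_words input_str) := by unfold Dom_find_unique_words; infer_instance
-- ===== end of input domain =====

-- B drops A's frequency-dict build + items scan in favour of a single filter testing words.count(w) == 1 (simpler, not faster).

-- ===== PORT A =====
-- literal port: build the count dict with the same if/else, then append keys with value 1 in items order
def find_unique_words (input_str : String) : List String :=
  let d := (PySem.Str.split₀ input_str).foldl
    (fun d word =>
      if d.contains word then d.insert word (d.getD word 0 + 1)
      else d.insert word (1 : Int))
    PySem.Dict.empty
  d.items.foldl (fun out kv => if kv.2 = 1 then out ++ [kv.1] else out) []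

-- ===== PORT B =====
def find_unique_words_alt (input_str : String) : List String :=
  let words := PySem.Str.split₀ input_str
  words.filter (fun w => PySem.List.count words w == 1)

-- ===== PRECONDITION & SPEC =====
def Spec_find_unique_words (input_str : String) (out : List String) : Prop := out = find_unique_words_alt input_str
instance (input_str : String) (out : List String) : Decidable (Spec_find_unique_words input_str out) := by unfold Spec_find_unique_words; infer_instance

-- ===== CLAIM (what is proved, stated in full; the proofs are below) =====
def Claim_equal_find_unique_words : Prop := ∀ (input_str : String), Dom_find_unique_words input_str → Spec_find_unique_words input_str (find_unique_words input_str)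

-- ===== LEMMAS AND PROOFS =====

-- A's if/else update is exactly the counter-building update.
theorem pv_step_eq (d : PySem.Dict String Int) (w : String) :
    (if d.contains w then d.insert w (d.getD w 0 + 1) else d.insert w (1 : Int))
      = d.insert w (d.getD w 0 + 1) := by
  by_cases h : d.contains w = true
  · simp [h]
  · simp only [Bool.not_eq_true] at h
    simp [h, PySem.Dict.getD_of_not_contains d 0 h]

-- folding Set.add while no p-element recurs: filter commutes with the dedup fold
theorem pv_filter_foldl_add (p : String → Bool) :
    ∀ (l s : List String),
      (∀ x, p x = true → x ∈ s → x ∉ l) →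
      (∀ x, p x = true → l.count x ≤ 1) →
      (l.foldl PySem.Set.add s).filter p = s.filter p ++ l.filter p := by
  intro l
  induction l with
  | nil => intro s _ _; simp
  | cons y t ih =>
    intro s h1 h2
    simp only [List.foldl_cons]
    by_cases hy : y ∈ s
    · have hadd : PySem.Set.add s y = s := by
        simp [PySem.Set.add, PySem.Set.contains, hy]
      have hpy : p y = false := by
        by_contra h
        simp only [Bool.not_eq_false] at h
        exact (h1 y h hy) (List.mem_cons_self)
      rw [hadd, ih s (fun x hx hxs => fun hxt => h1 x hx hxs (List.mem_cons_of_mem _ hxt))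
        (fun x hx => le_trans (List.count_le_count_cons ..) (h2 x hx))]
      simp [List.filter_cons, hpy]
    · have hadd : PySem.Set.add s y = s ++ [y] := by
        simp [PySem.Set.add, PySem.Set.contains, hy]
      have h1' : ∀ x, p x = true → x ∈ s ++ [y] → x ∉ t := by
        intro x hx hxs
        rcases List.mem_append.mp hxs with hxs | hxy
        · exact fun hxt => h1 x hx hxs (List.mem_cons_of_mem _ hxt)
        · have hxy : x = y := by simpa using hxy
          subst hxy
          have := h2 x hx
          rw [List.count_cons_self] at this
          have : t.count x = 0 := by omega
          exact List.count_eq_zero.mp this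
      have h2' : ∀ x, p x = true → t.count x ≤ 1 :=
        fun x hx => le_trans (List.count_le_count_cons ..) (h2 x hx)
      rw [hadd, ih (s ++ [y]) h1' h2']
      by_cases hpy : p y = true
      · simp [List.filter_append, hpy]
      · simp only [Bool.not_eq_true] at hpy
        simp [List.filter_append, hpy]

theorem pv_filter_ofList (p : String → Bool) (l : List String)
    (h : ∀ x, p x = true → l.count x ≤ 1) :
    (PySem.Set.ofList l).filter p = l.filter p := by
  rw [PySem.Set.ofList_eq_foldl]
  simpa using pv_filter_foldl_add p l [] (by simp) h

-- ===== VERDICT (by name: the statement is the Claim_ definition above) =====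
theorem find_unique_words_spec : Claim_equal_find_unique_words := by
  intro input_str _
  unfold Spec_find_unique_words find_unique_words find_unique_words_alt
  set words := PySem.Str.split₀ input_str with hw
  have hstep : words.foldl
      (fun d word =>
        if d.contains word then d.insert word (d.getD word 0 + 1)
        else d.insert word (1 : Int)) PySem.Dict.empty
      = PySem.Dict.counter words := by
    rw [← PySem.Dict.foldl_insert_getD_add_one_eq_counter]
    have hf : (fun (d : PySem.Dict String Int) (word : String) =>
        if d.contains word then d.insert word (d.getD word 0 + 1)
        else d.insert word (1 : Int))
        = fun d word => d.insert word (d.getD word 0 + 1) := by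
      funext d w; exact pv_step_eq d w
    rw [hf]
  simp only [hstep, PySem.Dict.items_counter, List.foldl_map]
  have : (fun (out : List String) (k : String) =>
        if ((List.count k words : Int)) = 1 then out ++ [k] else out)
      = fun out k => if (fun x => PySem.List.count words x == 1) k = true then out ++ [id k] else out := by
    funext out k
    simp only [PySem.List.count, id_eq, beq_iff_eq]
    congr 1
    simp only [eq_iff_iff]
    omega
  rw [this, PySem.List.foldl_append_if]
  rw [pv_filter_ofList _ words (by
    intro x hx
    simp only [PySem.List.count, beq_iff_eq] at hx
    omega)]
  simp
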